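-- pv_equiv track=rewrite | github.com/BrianMills2718/goodwill | projects/autonomous-system-builder/src/context/cross_reference_manager.py | _prioritize_files_by_relevance
-- ===== SOURCE A (Python) =====
-- from typing import Dict, List, Set, Optional, Tuple, Any
--
-- def _prioritize_files_by_relevance(files: List[str], task_files: List[str], max_tokens: int) -> List[str]:
--     """Prioritize files by relevance to task"""
--     # Simple prioritization: task files first, then by file type importance
--     task_set = set(task_files)
--
--     prioritized = []
--
--     # Add task files first
--     for f in files:
--         if f in task_set:
--             prioritized.append(f)
--
--     # Add remaining files, prioritizing certain types
--     remaining = [f for f in files if f not in task_set]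
--
--     # Sort by file type importance
--     def file_priority(file_path: str) -> int:
--         if file_path.endswith('.py'):
--             return 0  # Highest priority
--         elif file_path.endswith('.md'):
--             return 1
--         elif file_path.endswith('.json'):
--             return 2
--         else:
--             return 3
--
--     remaining.sort(key=file_priority)
--     prioritized.extend(remaining)
--
--     # Limit by estimated tokens (rough)
--     estimated_tokens = 0
--     result = []
--     for file_path in prioritized:
--         # Rough estimate: 1000 tokens per file
--         if estimated_tokens + 1000 > max_tokens:
--             break
--         result.append(file_path)
--         estimated_tokens += 1000
--
--     return result
-- ===== SOURCE B (Python) =====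
-- # Single pass into ordered buckets (task / .py / .md / .json / other), then one slice
-- # for the token budget -- no comparison sort, no second scan of `files`.
-- def _prioritize_files_by_relevance(files, task_files, max_tokens):
--     task_set = set(task_files)
--     task_bucket, py_b, md_b, json_b, other_b = [], [], [], [], []
--     for f in files:
--         if f in task_set:
--             task_bucket.append(f)
--         elif f.endswith('.py'):
--             py_b.append(f)
--         elif f.endswith('.md'):
--             md_b.append(f)
--         elif f.endswith('.json'):
--             json_b.append(f)
--         else:
--             other_b.append(f)
--     prioritized = task_bucket + py_b + md_b + json_b + other_b
--     return prioritized[:max(0, max_tokens // 1000)]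
-- ===== Notes on version B (the rewrite author's own statement) =====
-- stated objective: simpler
-- what changed: Replaces A's two passes plus a comparison sort keyed on a priority function and the token-accumulation break-loop with a single pass distributing each file into one of five ordered buckets (task, .py, .md, .json, other) that are concatenated and cut by one slice prioritized[:max(0, max_tokens // 1000)].
import Mathlib
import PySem

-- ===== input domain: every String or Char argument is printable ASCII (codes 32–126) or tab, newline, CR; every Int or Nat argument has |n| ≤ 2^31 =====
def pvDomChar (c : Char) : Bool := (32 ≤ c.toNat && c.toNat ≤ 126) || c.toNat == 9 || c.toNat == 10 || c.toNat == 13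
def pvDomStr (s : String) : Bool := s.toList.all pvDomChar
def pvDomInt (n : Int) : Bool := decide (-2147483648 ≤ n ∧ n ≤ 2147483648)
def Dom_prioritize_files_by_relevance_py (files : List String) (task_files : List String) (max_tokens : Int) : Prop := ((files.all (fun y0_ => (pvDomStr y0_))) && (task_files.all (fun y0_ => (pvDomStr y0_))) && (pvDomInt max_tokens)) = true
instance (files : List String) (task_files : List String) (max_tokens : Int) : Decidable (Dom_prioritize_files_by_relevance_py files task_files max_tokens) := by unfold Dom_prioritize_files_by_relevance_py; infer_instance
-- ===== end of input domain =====

-- B replaces A's priority-keyed sort with a single pass into ordered buckets and replaces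
-- A's token-accumulation loop with one slice (objective: simpler, same results).

-- ===== PORT A =====
-- A's nested `file_priority` key function
def pvFilePriority (f : String) : Int :=
  if PySem.Str.endswith f ".py" then 0
  else if PySem.Str.endswith f ".md" then 1
  else if PySem.Str.endswith f ".json" then 2
  else 3

-- A's final for-loop with `break`: stop as soon as estimated_tokens + 1000 > max_tokens
def pvTakeLoop : List String → Int → Int → List String
  | [], _, _ => []
  | f :: rest, est, mt => if est + 1000 > mt then [] else f :: pvTakeLoop rest (est + 1000) mt

def prioritize_files_by_relevance_py (files : List String) (task_files : List String) (max_tokens : Int) : List String :=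
  let task_set := PySem.Set.ofList task_files
  -- for f in files: if f in task_set: prioritized.append(f)
  let prioritized := files.foldl (fun acc f => if PySem.Set.contains task_set f then acc ++ [f] else acc) []
  -- remaining = [f for f in files if f not in task_set]
  let remaining := files.filter (fun f => !(PySem.Set.contains task_set f))
  -- remaining.sort(key=file_priority); prioritized.extend(remaining)
  let prioritized := prioritized ++ PySem.List.sorted remaining pvFilePriority
  -- token-budget loop
  pvTakeLoop prioritized 0 max_tokens

-- ===== PORT B =====
-- the body of B's single for-loop: append f to exactly one of the 5 buckets
def pvBucketStep (c : String → Bool)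
    (acc : List String × List String × List String × List String × List String)
    (f : String) : List String × List String × List String × List String × List String :=
  if c f then (acc.1 ++ [f], acc.2.1, acc.2.2.1, acc.2.2.2.1, acc.2.2.2.2)
  else if PySem.Str.endswith f ".py" then (acc.1, acc.2.1 ++ [f], acc.2.2.1, acc.2.2.2.1, acc.2.2.2.2)
  else if PySem.Str.endswith f ".md" then (acc.1, acc.2.1, acc.2.2.1 ++ [f], acc.2.2.2.1, acc.2.2.2.2)
  else if PySem.Str.endswith f ".json" then (acc.1, acc.2.1, acc.2.2.1, acc.2.2.2.1 ++ [f], acc.2.2.2.2)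
  else (acc.1, acc.2.1, acc.2.2.1, acc.2.2.2.1, acc.2.2.2.2 ++ [f])

def prioritize_files_by_relevance_py_alt (files : List String) (task_files : List String) (max_tokens : Int) : List String :=
  let task_set := PySem.Set.ofList task_files
  let bs := files.foldl (pvBucketStep (fun f => PySem.Set.contains task_set f)) ([], [], [], [], [])
  let prioritized := bs.1 ++ bs.2.1 ++ bs.2.2.1 ++ bs.2.2.2.1 ++ bs.2.2.2.2
  -- prioritized[:max(0, max_tokens // 1000)]
  PySem.List.slice prioritized none (some (max 0 (PySem.Int.floordiv max_tokens 1000)))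

-- ===== PRECONDITION & SPEC =====
def Spec_prioritize_files_by_relevance_py (files : List String) (task_files : List String) (max_tokens : Int) (out : List String) : Prop := out = prioritize_files_by_relevance_py_alt files task_files max_tokens
instance (files : List String) (task_files : List String) (max_tokens : Int) (out : List String) : Decidable (Spec_prioritize_files_by_relevance_py files task_files max_tokens out) := by unfold Spec_prioritize_files_by_relevance_py; infer_instance

-- ===== CLAIM (what is proved, stated in full; the proofs are below) =====
def Claim_equal_prioritize_files_by_relevance_py : Prop := ∀ (files : List String) (task_files : List String) (max_tokens : Int), Dom_prioritize_files_by_relevance_py files task_files max_tokens → Spec_prioritize_files_by_relevance_py files task_files max_tokens (prioritize_files_by_relevance_py files task_files max_tokens)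

-- ===== LEMMAS AND PROOFS =====

-- insertBy walks past a prefix it does not insert into
lemma insertBy_append_skip {α : Type} (before : α → α → Bool) (x : α) (l1 l2 : List α)
    (h : ∀ y ∈ l1, before x y = false) :
    PySem.List.insertBy before x (l1 ++ l2) = l1 ++ PySem.List.insertBy before x l2 := by
  induction l1 with
  | nil => simp
  | cons a t ih =>
    have ha : before x a = false := h a (by simp)
    simp [PySem.List.insertBy, ha, ih (fun y hy => h y (by simp [hy]))]

-- insertBy inserts in front when every element should come after x
lemma insertBy_front {α : Type} (before : α → α → Bool) (x : α) (l : List α)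
    (h : ∀ y ∈ l, before x y = true) :
    PySem.List.insertBy before x l = x :: l := by
  cases l with
  | nil => simp [PySem.List.insertBy]
  | cons a t => simp [PySem.List.insertBy, h a (by simp)]

-- a stable sort on a 4-valued integer key is the concatenation of the 4 filters
lemma sorted_four (key : String → Int) (hk : ∀ y, 0 ≤ key y ∧ key y ≤ 3) (xs : List String) :
    PySem.List.sorted xs key =
      xs.filter (fun y => key y == 0) ++ xs.filter (fun y => key y == 1) ++
      xs.filter (fun y => key y == 2) ++ xs.filter (fun y => key y == 3) := by
  induction xs using List.reverseRecOn with
  | nil => simp [PySem.List.sorted]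
  | append_singleton xs x ih =>
    rw [PySem.List.sorted_eq_foldl_insertBy] at ih ⊢
    rw [List.foldl_append, List.foldl_cons, List.foldl_nil, ih]
    have hmem : ∀ (i : Int) (y : String), y ∈ xs.filter (fun y => key y == i) → key y = i := by
      intro i y hy
      simpa using (List.of_mem_filter hy)
    have hskip : ∀ (i : Int), i ≤ key x →
        ∀ y ∈ xs.filter (fun y => key y == i),
          (decide (key x < key y) : Bool) = false := by
      intro i hi y hy
      have := hmem i y hy
      simp; omega
    have hfront : ∀ (i : Int), key x < i →
        ∀ y ∈ xs.filter (fun y => key y == i),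
          (decide (key x < key y) : Bool) = true := by
      intro i hi y hy
      have := hmem i y hy
      simp; omega
    have hx := hk x
    have h4 : key x = 0 ∨ key x = 1 ∨ key x = 2 ∨ key x = 3 := by omega
    simp only [List.append_assoc]
    rcases h4 with h | h | h | h
    · rw [insertBy_append_skip _ _ _ _ (hskip 0 (by omega)),
          insertBy_front _ _ _ (by
            intro y hy
            simp only [List.mem_append] at hy
            rcases hy with hy | hy | hy
            exacts [hfront 1 (by omega) y hy, hfront 2 (by omega) y hy,
                    hfront 3 (by omega) y hy])]
      simp [List.filter_append, h]
    · rw [insertBy_append_skip _ _ _ _ (hskip 0 (by omega)),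
          insertBy_append_skip _ _ _ _ (hskip 1 (by omega)),
          insertBy_front _ _ _ (by
            intro y hy
            simp only [List.mem_append] at hy
            rcases hy with hy | hy
            exacts [hfront 2 (by omega) y hy, hfront 3 (by omega) y hy])]
      simp [List.filter_append, h]
    · rw [insertBy_append_skip _ _ _ _ (hskip 0 (by omega)),
          insertBy_append_skip _ _ _ _ (hskip 1 (by omega)),
          insertBy_append_skip _ _ _ _ (hskip 2 (by omega)),
          insertBy_front _ _ _ (hfront 3 (by omega))]
      simp [List.filter_append, h]
    · rw [PySem.List.insertBy_of_forall_not_before _ _ _ (by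
        intro y hy
        simp only [List.mem_append] at hy
        rcases hy with hy | hy | hy | hy
        exacts [hskip 0 (by omega) y hy, hskip 1 (by omega) y hy,
                hskip 2 (by omega) y hy, hskip 3 (by omega) y hy])]
      simp [List.filter_append, h]

-- B's 5-bucket fold computes 5 filters of `files`
lemma buckets_eq (c : String → Bool) (files : List String) (t p m j o : List String) :
    files.foldl (pvBucketStep c) (t, p, m, j, o) =
    (t ++ files.filter c,
     p ++ files.filter (fun f => !c f && PySem.Str.endswith f ".py"),
     m ++ files.filter (fun f => !c f && !PySem.Str.endswith f ".py" && PySem.Str.endswith f ".md"),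
     j ++ files.filter (fun f => !c f && !PySem.Str.endswith f ".py" && !PySem.Str.endswith f ".md" && PySem.Str.endswith f ".json"),
     o ++ files.filter (fun f => !c f && !PySem.Str.endswith f ".py" && !PySem.Str.endswith f ".md" && !PySem.Str.endswith f ".json")) := by
  induction files generalizing t p m j o with
  | nil => simp
  | cons f rest ih =>
    simp only [List.foldl_cons, List.filter_cons]
    by_cases h1 : c f
    · simp [pvBucketStep, h1, ih]
    · by_cases h2 : PySem.Chars.endswith f.toList ['.', 'p', 'y']
      · simp [pvBucketStep, h1, h2, ih]
      · by_cases h3 : PySem.Chars.endswith f.toList ['.', 'm', 'd']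
        · simp [pvBucketStep, h1, h2, h3, ih]
        · by_cases h4 : PySem.Chars.endswith f.toList ['.', 'j', 's', 'o', 'n']
          · simp [pvBucketStep, h1, h2, h3, h4, ih]
          · simp [pvBucketStep, h1, h2, h3, h4, ih]

-- the four A-side priority filters are B's extension buckets
lemma filter_prio_zero (c : String → Bool) (files : List String) :
    files.filter (fun a => (pvFilePriority a == 0) && !c a) =
    files.filter (fun f => !c f && PySem.Str.endswith f ".py") :=
  List.filter_congr (fun a _ => by
    unfold pvFilePriority
    cases hp : PySem.Chars.endswith a.toList ['.', 'p', 'y'] <;> cases hc : c a <;>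
      simp [hp]; split_ifs <;> simp)

lemma filter_prio_one (c : String → Bool) (files : List String) :
    files.filter (fun a => (pvFilePriority a == 1) && !c a) =
    files.filter (fun f => !c f && !PySem.Str.endswith f ".py" && PySem.Str.endswith f ".md") :=
  List.filter_congr (fun a _ => by
    unfold pvFilePriority
    cases hp : PySem.Chars.endswith a.toList ['.', 'p', 'y'] <;> cases hm : PySem.Chars.endswith a.toList ['.', 'm', 'd'] <;>
      cases hc : c a <;> simp [hp, hm]; split_ifs <;> simp)

lemma filter_prio_two (c : String → Bool) (files : List String) :
    files.filter (fun a => (pvFilePriority a == 2) && !c a) =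
    files.filter (fun f => !c f && !PySem.Str.endswith f ".py" && !PySem.Str.endswith f ".md" && PySem.Str.endswith f ".json") :=
  List.filter_congr (fun a _ => by
    unfold pvFilePriority
    cases hp : PySem.Chars.endswith a.toList ['.', 'p', 'y'] <;> cases hm : PySem.Chars.endswith a.toList ['.', 'm', 'd'] <;>
      cases hj : PySem.Chars.endswith a.toList ['.', 'j', 's', 'o', 'n'] <;> simp [hp, hm, hj])

lemma filter_prio_three (c : String → Bool) (files : List String) :
    files.filter (fun a => (pvFilePriority a == 3) && !c a) =
    files.filter (fun f => !c f && !PySem.Str.endswith f ".py" && !PySem.Str.endswith f ".md" && !PySem.Str.endswith f ".json") :=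
  List.filter_congr (fun a _ => by
    unfold pvFilePriority
    cases hp : PySem.Chars.endswith a.toList ['.', 'p', 'y'] <;> cases hm : PySem.Chars.endswith a.toList ['.', 'm', 'd'] <;>
      cases hj : PySem.Chars.endswith a.toList ['.', 'j', 's', 'o', 'n'] <;> simp [hp, hm, hj])

-- A's break-loop is a take of (max_tokens - est) // 1000 elements
lemma takeLoop_eq (l : List String) (est mt : Int) :
    pvTakeLoop l est mt = l.take ((PySem.Int.floordiv (mt - est) 1000).toNat) := by
  induction l generalizing est with
  | nil => simp [pvTakeLoop]
  | cons f rest ih =>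
    rw [pvTakeLoop, PySem.Int.floordiv_eq_ediv_of_pos (by norm_num)]
    by_cases h : est + 1000 > mt
    · have : ((mt - est) / 1000).toNat = 0 := by omega
      simp [h, this]
    · have : ((mt - est) / 1000).toNat = ((mt - (est + 1000)) / 1000).toNat + 1 := by omega
      rw [if_neg h, this, ih (est + 1000), PySem.Int.floordiv_eq_ediv_of_pos (by norm_num)]
      rfl

-- B's slice prioritized[:k] with 0 ≤ k is a take
lemma slice_to_nonneg {α : Type} (xs : List α) (k : Int) (hk : 0 ≤ k) :
    PySem.List.slice xs none (some k) = xs.take k.toNat := by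
  simp only [PySem.List.slice, PySem.List.clampIdx]
  rw [if_neg (by omega)]
  simp only [Nat.sub_zero, List.drop_zero]
  exact List.take_eq_take_min.symm

-- ===== VERDICT (by name: the statement is the Claim_ definition above) =====
theorem prioritize_files_by_relevance_py_spec : Claim_equal_prioritize_files_by_relevance_py := by
  intro files task_files max_tokens _
  unfold Spec_prioritize_files_by_relevance_py
  simp only [prioritize_files_by_relevance_py, prioritize_files_by_relevance_py_alt]
  rw [PySem.List.foldl_append_if_eq_filter, buckets_eq,
      sorted_four pvFilePriority (fun y => by unfold pvFilePriority; split_ifs <;> omega),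
      List.filter_filter, List.filter_filter, List.filter_filter, List.filter_filter,
      filter_prio_zero, filter_prio_one, filter_prio_two, filter_prio_three,
      takeLoop_eq, slice_to_nonneg _ _ (le_max_left 0 _)]
  have hmax : (max 0 (PySem.Int.floordiv max_tokens 1000)).toNat
      = (PySem.Int.floordiv (max_tokens - 0) 1000).toNat := by
    rw [PySem.Int.floordiv_eq_ediv_of_pos (by norm_num),
        PySem.Int.floordiv_eq_ediv_of_pos (by norm_num)]
    omega
  rw [hmax]
  simp only [List.nil_append, List.append_assoc]
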